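-- pv_equiv track=rewrite | github.com/srcDiff/srcDiff | diff_trace/sequence_creator.py | sequence_tag
-- ===== SOURCE A (Python) =====
-- def sequence_tag(tag) :
--
--     name = get_name(tag)
--     predicates = get_predicates(tag)
--
--     sequence_list = str(len(predicates) + 1) + "\t" + name
--
--     for predicate in predicates :
--
--         sequence_list += "\t" + name + predicate
--
--
--     sequence_list += "\n"
--
--     return sequence_list
--
-- def clean_predicate(predicate) :
--
--     predicate = predicate.replace("'", "")
--
--     return predicate
--
-- def get_predicates(tag) :
--
--     predicates = []
--
--     while not(tag.find("[") == -1) :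
--
--         start = tag.find("[")
--
--         end = find_end_bracket(tag, start)
--
--         predicates.append(clean_predicate(tag[ start : end + 1 ]))
--
--         tag = tag[ end + 1 :]
--
--     return predicates
--
-- def find_end_bracket(tag, start) :
--
--     bracket_count = 0
--     for i in range(start, len(tag)) :
--
--         if tag[i] == "[" :
--             bracket_count += 1
--
--         if tag[i] == "]" :
--             bracket_count -= 1
--
--         if bracket_count == 0 :
--             return i
--
--     return -1
--
-- def get_name(tag) :
--
--     offset = tag.find("[")
--
--     if offset is -1 :
--         return tag
--     else :
--         return tag[: offset]
-- ===== SOURCE B (Python) =====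
-- def sequence_tag(tag):
--     name_chars = []
--     seen_bracket = False
--     groups = []
--     depth = 0
--     cur = []
--     for ch in tag:
--         if ch == '[':
--             seen_bracket = True
--             depth += 1
--         if not seen_bracket:
--             name_chars.append(ch)
--         if depth > 0:
--             cur.append(ch)
--         if ch == ']' and depth > 0:
--             depth -= 1
--             if depth == 0:
--                 groups.append(''.join(cur).replace("'", ""))
--                 cur = []
--     name = ''.join(name_chars)
--     parts = [str(len(groups) + 1), name] + [name + g for g in groups]
--     return '\t'.join(parts) + '\n'
-- ===== Notes on version B (the rewrite author's own statement) =====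
-- stated objective: alternative
-- what changed: A repeatedly calls find(), a bracket-matching helper and string slicing, re-slicing the remaining tag once per predicate; B collects the name and all predicate groups in one single character scan that maintains a bracket-depth counter, then assembles the result with a join.
-- outside the precondition, e.g. on sequence_tag('['): A does not finish within the time limit, B returns '1\t\n'
import Mathlib
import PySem

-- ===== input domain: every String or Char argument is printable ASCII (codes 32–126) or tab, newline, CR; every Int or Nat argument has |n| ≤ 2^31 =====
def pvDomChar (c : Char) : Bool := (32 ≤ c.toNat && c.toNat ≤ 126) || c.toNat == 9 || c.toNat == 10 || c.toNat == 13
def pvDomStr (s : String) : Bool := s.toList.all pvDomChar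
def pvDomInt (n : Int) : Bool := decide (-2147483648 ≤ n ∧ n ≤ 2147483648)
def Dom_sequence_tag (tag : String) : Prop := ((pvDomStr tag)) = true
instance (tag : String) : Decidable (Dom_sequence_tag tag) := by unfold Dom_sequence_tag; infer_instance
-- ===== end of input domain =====

-- B replaces A's repeated find/slice passes by one linear character scan that collects the
-- name and the bracket groups in a single traversal (objective: alternative decomposition).

-- ===== PORT A =====

-- for i in range(start, len(tag)) with the running bracket_count and the early return
def pvFebGo : List Char → Int → Int → Int
  | [], _, _ => -1
  | c :: rest, i, bc =>
    let bc1 := if c = '[' then bc + 1 else bc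
    let bc2 := if c = ']' then bc1 - 1 else bc1
    if bc2 = 0 then i else pvFebGo rest (i + 1) bc2

def pvFindEndBracket (tag : List Char) (start : Int) : Int :=
  pvFebGo (tag.drop start.toNat) start 0

def pvCleanPredicate (p : List Char) : List Char := PySem.Chars.replace p ['\''] []

-- A's while loop; the fuel (length + 1) only makes the recursion well-founded — inside
-- Pre_ every iteration strictly shortens the string, so the fuel is never exhausted.
def pvGetPredicatesGo : Nat → List Char → List (List Char) → List (List Char)
  | 0, _, acc => acc
  | fuel + 1, tag, acc =>
    if PySem.Chars.find tag ['['] = -1 then acc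
    else
      let start := PySem.Chars.find tag ['[']
      let e := pvFindEndBracket tag start
      let pred := pvCleanPredicate (PySem.List.slice tag (some start) (some (e + 1)))
      pvGetPredicatesGo fuel (PySem.List.slice tag (some (e + 1)) none) (acc ++ [pred])

def pvGetPredicates (tag : List Char) : List (List Char) :=
  pvGetPredicatesGo (tag.length + 1) tag []

def pvGetName (tag : List Char) : List Char :=
  let offset := PySem.Chars.find tag ['[']
  if offset = -1 then tag else PySem.List.slice tag none (some offset)

def sequence_tag (tag : String) : String :=
  let cs := tag.toList
  let name := pvGetName cs
  let predicates := pvGetPredicates cs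
  let s0 := PySem.Int.toChars ((predicates.length : Int) + 1) ++ ['\t'] ++ name
  let s1 := predicates.foldl (fun acc p => acc ++ ['\t'] ++ name ++ p) s0
  String.ofList (s1 ++ ['\n'])

-- ===== PORT B =====

-- one step of B's single scan: state = (name_chars, seen_bracket, groups, depth, cur)
def pvStepB (st : List Char × Bool × List (List Char) × Int × List Char) (ch : Char) :
    List Char × Bool × List (List Char) × Int × List Char :=
  let (nameChars, seen, groups, depth, cur) := st
  let seen := if ch = '[' then true else seen
  let depth := if ch = '[' then depth + 1 else depth
  let nameChars := if seen then nameChars else nameChars ++ [ch]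
  let cur := if 0 < depth then cur ++ [ch] else cur
  if ch = ']' ∧ 0 < depth then
    if depth - 1 = 0 then
      (nameChars, seen, groups ++ [PySem.Chars.replace cur ['\''] []], depth - 1, [])
    else (nameChars, seen, groups, depth - 1, cur)
  else (nameChars, seen, groups, depth, cur)

def sequence_tag_alt (tag : String) : String :=
  let st := tag.toList.foldl pvStepB ([], false, [], 0, [])
  let name := st.1
  let groups := st.2.2.1
  let parts := PySem.Int.toChars ((groups.length : Int) + 1) :: name :: groups.map (fun g => name ++ g)
  String.ofList (PySem.Chars.join ['\t'] parts ++ ['\n'])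

-- ===== PRECONDITION & SPEC =====

-- the clamped bracket-depth scan of the whole string (a stray ']' at depth 0 is ignored)
def pvClampD (cs : List Char) (d : Nat) : Nat :=
  cs.foldl (fun d c => if c = '[' then d + 1 else if c = ']' ∧ 0 < d then d - 1 else d) d

-- Pre_ excludes exactly the tags with an unmatched top-level '[', on which A's while
-- loop never terminates (find_end_bracket returns -1 and the string is never shortened).
def Pre_sequence_tag (tag : String) : Prop := pvClampD tag.toList 0 = 0
instance (tag : String) : Decidable (Pre_sequence_tag tag) := by
  unfold Pre_sequence_tag; infer_instance

def pvWitness_sequence_tag : String := "fn['a d'][x[1]]"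

def Spec_sequence_tag (tag : String) (out : String) : Prop := out = sequence_tag_alt tag
instance (tag : String) (out : String) : Decidable (Spec_sequence_tag tag out) := by
  unfold Spec_sequence_tag; infer_instance

-- ===== CLAIM (what is proved, stated in full; the proofs are below) =====
def Claim_equal_sequence_tag : Prop :=
  ∀ (tag : String), Dom_sequence_tag tag → Pre_sequence_tag tag →
    Spec_sequence_tag tag (sequence_tag tag)

-- ===== LEMMAS AND PROOFS =====

-- pvSplitGrp x d = some (g, r) iff, entered at bracket depth d ≥ 1, the group closes
-- inside x; g is the remainder of the group (up to and including its final ']'), r the rest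
def pvSplitGrp : List Char → Nat → Option (List Char × List Char)
  | [], _ => none
  | c :: rest, d =>
    if c = ']' then
      if d = 1 then some ([c], rest)
      else (pvSplitGrp rest (d - 1)).map (fun p => (c :: p.1, p.2))
    else if c = '[' then (pvSplitGrp rest (d + 1)).map (fun p => (c :: p.1, p.2))
    else (pvSplitGrp rest d).map (fun p => (c :: p.1, p.2))

-- the group list both programs produce, with the same fuel discipline as A's loop
def pvGroupsOfGo : Nat → List Char → List (List Char)
  | 0, _ => []
  | fuel + 1, cs =>
    match cs.dropWhile (fun x => x ≠ '[') with
    | [] => []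
    | _ :: v =>
      match pvSplitGrp v 1 with
      | none => []
      | some (g, r) => pvCleanPredicate ('[' :: g) :: pvGroupsOfGo fuel r

theorem pvSplitGrp_append : ∀ {x : List Char} {d : Nat} {g r : List Char},
    pvSplitGrp x d = some (g, r) → x = g ++ r := by
  intro x
  induction x with
  | nil => intro d g r h; simp [pvSplitGrp] at h
  | cons c rest ih =>
    intro d g r h
    by_cases hc : c = ']'
    · subst hc
      by_cases hd : d = 1
      · subst hd
        simp [pvSplitGrp] at h
        obtain ⟨hg, hr⟩ := h
        subst hg; subst hr; simp
      · simp [pvSplitGrp, hd] at h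
        obtain ⟨a, hrec, hg⟩ := h
        subst hg; simpa using ih hrec
    · by_cases hb : c = '['
      · subst hb
        simp [pvSplitGrp, hc] at h
        obtain ⟨a, hrec, hg⟩ := h
        subst hg; simpa using ih hrec
      · simp [pvSplitGrp, hc, hb] at h
        obtain ⟨a, hrec, hg⟩ := h
        subst hg; simpa using ih hrec

theorem pvFebGo_some : ∀ {x : List Char} {d : Nat} {g r : List Char}, 1 ≤ d →
    pvSplitGrp x d = some (g, r) → ∀ i : Int, pvFebGo x i (d : Int) = i + g.length - 1 := by
  intro x
  induction x with
  | nil => intro d g r _ h; simp [pvSplitGrp] at h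
  | cons c rest ih =>
    intro d g r hd1 h i
    by_cases hc : c = ']'
    · subst hc
      by_cases hd : d = 1
      · subst hd
        simp [pvSplitGrp] at h
        obtain ⟨hg, hr⟩ := h
        subst hg
        simp [pvFebGo]
      · simp [pvSplitGrp, hd] at h
        obtain ⟨a, hrec, hg⟩ := h
        subst hg
        have h2 : ¬ ((d : Int) - 1 = 0) := by omega
        have h3 : ¬ ((d : Int) = 1) := by omega
        have h4 : ¬ (d - 1 = 0) := by omega
        have hih := ih (d := d - 1) (by omega) hrec (i + 1)
        have hstep : pvFebGo (']' :: rest) i (d : Int) = pvFebGo rest (i + 1) ((d - 1 : Nat) : Int) := by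
          have hcast : ((d - 1 : Nat) : Int) = (d : Int) - 1 := by omega
          rw [hcast]
          simp [pvFebGo, h2, h3, hd, h4]
        rw [hstep, hih]
        simp only [List.length_cons]
        push_cast
        ring
    · by_cases hb : c = '['
      · subst hb
        simp [pvSplitGrp, hc] at h
        obtain ⟨a, hrec, hg⟩ := h
        subst hg
        have h2 : ¬ ((d : Int) + 1 = 0) := by omega
        have h3 : ¬ ((d : Int) = -1) := by omega
        have h4 : ¬ (d + 1 = 0) := by omega
        have hih := ih (d := d + 1) (by omega) hrec (i + 1)
        have hstep : pvFebGo ('[' :: rest) i (d : Int) = pvFebGo rest (i + 1) ((d + 1 : Nat) : Int) := by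
          have hcast : ((d + 1 : Nat) : Int) = (d : Int) + 1 := by omega
          rw [hcast]
          simp [pvFebGo, h2, h3, h4]
        rw [hstep, hih]
        simp only [List.length_cons]
        push_cast
        ring
      · simp [pvSplitGrp, hc, hb] at h
        obtain ⟨a, hrec, hg⟩ := h
        subst hg
        have h2 : ¬ ((d : Int) = 0) := by omega
        have h4 : ¬ (d = 0) := by omega
        have hih := ih (d := d) hd1 hrec (i + 1)
        have hstep : pvFebGo (c :: rest) i (d : Int) = pvFebGo rest (i + 1) ((d : Nat) : Int) := by
          simp [pvFebGo, hb, hc, h2, h4]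
        rw [hstep, hih]
        simp only [List.length_cons]
        push_cast
        ring

theorem pvClampD_cons (c : Char) (cs : List Char) (d : Nat) :
    pvClampD (c :: cs) d =
      pvClampD cs (if c = '[' then d + 1 else if c = ']' ∧ 0 < d then d - 1 else d) := by
  simp [pvClampD]

theorem pvClampD_append (u v : List Char) (d : Nat) :
    pvClampD (u ++ v) d = pvClampD v (pvClampD u d) := by
  simp [pvClampD]

theorem pvClampD_pos_of_none : ∀ {x : List Char} {d : Nat}, 1 ≤ d →
    pvSplitGrp x d = none → 1 ≤ pvClampD x d := by
  intro x
  induction x with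
  | nil => intro d hd _; simpa [pvClampD] using hd
  | cons c rest ih =>
    intro d hd1 h
    by_cases hc : c = ']'
    · subst hc
      by_cases hd : d = 1
      · subst hd; simp [pvSplitGrp] at h
      · simp [pvSplitGrp, hd] at h
        rw [pvClampD_cons]
        have h0 : 0 < d := by omega
        simpa [h0] using ih (by omega) h
    · by_cases hb : c = '['
      · subst hb
        simp [pvSplitGrp, hc] at h
        rw [pvClampD_cons]
        simpa using ih (by omega) h
      · simp [pvSplitGrp, hc, hb] at h
        rw [pvClampD_cons]
        simpa [hb, hc] using ih hd1 h

theorem pvClampD_of_some : ∀ {x g r : List Char} {d : Nat}, 1 ≤ d →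
    pvSplitGrp x d = some (g, r) → pvClampD x d = pvClampD r 0 := by
  intro x
  induction x with
  | nil => intro g r d _ h; simp [pvSplitGrp] at h
  | cons c rest ih =>
    intro g r d hd1 h
    by_cases hc : c = ']'
    · subst hc
      by_cases hd : d = 1
      · subst hd
        simp [pvSplitGrp] at h
        obtain ⟨hg, hr⟩ := h
        subst hr
        rw [pvClampD_cons]
        simp
      · simp [pvSplitGrp, hd] at h
        obtain ⟨a, hrec, hg⟩ := h
        rw [pvClampD_cons]
        have h0 : 0 < d := by omega
        simpa [h0] using ih (by omega) hrec
    · by_cases hb : c = '['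
      · subst hb
        simp [pvSplitGrp, hc] at h
        obtain ⟨a, hrec, hg⟩ := h
        rw [pvClampD_cons]
        simpa using ih (by omega) hrec
      · simp [pvSplitGrp, hc, hb] at h
        obtain ⟨a, hrec, hg⟩ := h
        rw [pvClampD_cons]
        simpa [hb, hc] using ih hd1 hrec

theorem pvClampD_nobr : ∀ {u : List Char}, '[' ∉ u → pvClampD u 0 = 0 := by
  intro u
  induction u with
  | nil => intro _; simp [pvClampD]
  | cons c rest ih =>
    intro h
    simp only [List.mem_cons, not_or] at h
    rw [pvClampD_cons]
    have hc : c ≠ '[' := fun hh => h.1 hh.symm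
    simp [hc]
    exact ih h.2

theorem pvTakeWhile_len : ∀ (cs : List Char) (c : Char) (k : Nat),
    (∃ t, cs.drop k = c :: t) → (∀ i < k, ¬ ∃ t, cs.drop i = c :: t) →
    (cs.takeWhile (fun x => x ≠ c)).length = k := by
  intro cs
  induction cs with
  | nil => intro c k hk _; obtain ⟨t, ht⟩ := hk; simp at ht
  | cons a rest ih =>
    intro c k hk hmin
    cases k with
    | zero =>
      obtain ⟨t, ht⟩ := hk
      simp at ht
      simp [List.takeWhile_cons, ht.1]
    | succ k =>
      have ha : a ≠ c := by
        intro hac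
        exact hmin 0 (by omega) ⟨rest, by simp [hac]⟩
      have h2 := ih c k (by simpa using hk) (by
        intro i hi hex
        exact hmin (i + 1) (by omega) (by simpa using hex))
      simp only [ne_eq, decide_not] at h2 ⊢
      simp [List.takeWhile_cons, ha, h2]

theorem pvFind_singleton (cs : List Char) (c : Char) :
    PySem.Chars.find cs [c] =
      if c ∈ cs then (((cs.takeWhile (fun x => x ≠ c)).length : Nat) : Int) else -1 := by
  by_cases hm : c ∈ cs
  · obtain ⟨s, t, hst⟩ := List.append_of_mem hm
    have hinf : [c] <:+: cs := ⟨s, t, by simp [hst]⟩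
    have h0 : 0 ≤ PySem.Chars.find cs [c] := (PySem.Chars.find_nonneg_iff cs [c]).mpr hinf
    obtain ⟨hpre, hmin⟩ := PySem.Chars.find_spec h0
    have hlen : (cs.takeWhile (fun x => x ≠ c)).length = (PySem.Chars.find cs [c]).toNat := by
      apply pvTakeWhile_len
      · obtain ⟨t', ht'⟩ := hpre
        exact ⟨t', by simpa using ht'.symm⟩
      · intro i hi hex
        obtain ⟨t', ht'⟩ := hex
        exact hmin i hi ⟨t', by simp [ht']⟩
    rw [if_pos hm, hlen, Int.toNat_of_nonneg h0]
  · rw [if_neg hm]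
    apply (PySem.Chars.find_eq_neg_one_iff cs [c]).mpr
    intro hinf
    obtain ⟨s, t, hst⟩ := hinf
    exact hm (by rw [← hst]; simp)

theorem pvDropWhile_head : ∀ (cs : List Char) (p : Char → Bool) (c0 : Char) (v : List Char),
    cs.dropWhile p = c0 :: v → p c0 = false := by
  intro cs
  induction cs with
  | nil => intro p c0 v h; simp at h
  | cons a rest ih =>
    intro p c0 v h
    by_cases hp : p a
    · rw [List.dropWhile_cons_of_pos hp] at h
      exact ih p c0 v h
    · rw [List.dropWhile_cons_of_neg hp] at h
      cases h
      simpa using hp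

theorem pvStepB_nobr (na : List Char) (sb : Bool) (gs : List (List Char)) (c : Char)
    (hc : c ≠ '[') :
    pvStepB (na, sb, gs, 0, []) c = ((if sb then na else na ++ [c]), sb, gs, 0, []) := by
  simp [pvStepB, hc]

theorem pvStepB_open (na : List Char) (sb : Bool) (gs : List (List Char)) :
    pvStepB (na, sb, gs, 0, []) '[' = (na, true, gs, ((1 : Nat) : Int), ['[']) := by
  simp [pvStepB]

theorem pvFoldB_nobr : ∀ {u : List Char}, '[' ∉ u → ∀ (na : List Char) (sb : Bool)
    (gs : List (List Char)),
    u.foldl pvStepB (na, sb, gs, 0, []) = ((if sb then na else na ++ u), sb, gs, 0, []) := by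
  intro u
  induction u with
  | nil => intro _ na sb gs; simp
  | cons c rest ih =>
    intro h na sb gs
    simp only [List.mem_cons, not_or] at h
    have hc : c ≠ '[' := fun hh => h.1 hh.symm
    rw [List.foldl_cons, pvStepB_nobr na sb gs c hc, ih h.2]
    cases sb <;> simp

theorem pvFoldB_grp : ∀ {x : List Char} {d : Nat} {g r : List Char}, 1 ≤ d →
    pvSplitGrp x d = some (g, r) → ∀ (na : List Char) (gs : List (List Char)) (cur : List Char),
    x.foldl pvStepB (na, true, gs, (d : Int), cur) =
      r.foldl pvStepB (na, true, gs ++ [PySem.Chars.replace (cur ++ g) ['\''] []], 0, []) := by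
  intro x
  induction x with
  | nil => intro d g r _ h; simp [pvSplitGrp] at h
  | cons c rest ih =>
    intro d g r hd1 h na gs cur
    by_cases hc : c = ']'
    · subst hc
      by_cases hd : d = 1
      · subst hd
        simp [pvSplitGrp] at h
        obtain ⟨hg, hr⟩ := h
        subst hr
        simp only [Nat.cast_one]
        rw [List.foldl_cons]
        have hstep : pvStepB (na, true, gs, (1 : Int), cur) ']' =
            (na, true, gs ++ [PySem.Chars.replace (cur ++ [']']) ['\''] []], 0, []) := by
          simp [pvStepB]
        rw [hstep, ← hg]
      · simp [pvSplitGrp, hd] at h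
        obtain ⟨a, hrec, hg⟩ := h
        have hpos : (0 : Int) < (d : Int) := by omega
        have hpos' : 0 < d := by omega
        have hne : ¬ ((d : Int) - 1 = 0) := by omega
        have hne2 : ¬ ((d : Int) = 1) := by omega
        have hne3 : ¬ (d - 1 = 0) := by omega
        have hstep : pvStepB (na, true, gs, (d : Int), cur) ']' =
            (na, true, gs, ((d - 1 : Nat) : Int), cur ++ [']']) := by
          have hcast : ((d - 1 : Nat) : Int) = (d : Int) - 1 := by omega
          rw [hcast]
          simp [pvStepB, hpos, hpos', hne, hne2, hd, hne3]
        rw [List.foldl_cons, hstep]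
        rw [ih (d := d - 1) (by omega) hrec na gs (cur ++ [']'])]
        rw [← hg]
        simp
    · by_cases hb : c = '['
      · subst hb
        simp [pvSplitGrp, hc] at h
        obtain ⟨a, hrec, hg⟩ := h
        have hpos : (0 : Int) < (d : Int) + 1 := by omega
        have hpos' : 0 < d + 1 := by omega
        have hstep : pvStepB (na, true, gs, (d : Int), cur) '[' =
            (na, true, gs, ((d + 1 : Nat) : Int), cur ++ ['[']) := by
          have hcast : ((d + 1 : Nat) : Int) = (d : Int) + 1 := by omega
          rw [hcast]
          simp [pvStepB, hpos, hpos']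
        rw [List.foldl_cons, hstep]
        rw [ih (d := d + 1) (by omega) hrec na gs (cur ++ ['['])]
        rw [← hg]
        simp
      · simp [pvSplitGrp, hc, hb] at h
        obtain ⟨a, hrec, hg⟩ := h
        have hpos : (0 : Int) < (d : Int) := by omega
        have hpos' : 0 < d := by omega
        have hstep : pvStepB (na, true, gs, (d : Int), cur) c =
            (na, true, gs, (d : Int), cur ++ [c]) := by
          simp [pvStepB, hb, hc, hpos, hpos']
        rw [List.foldl_cons, hstep, ih (d := d) hd1 hrec na gs (cur ++ [c])]
        rw [← hg]
        simp

theorem pvFoldB_main : ∀ (fuel : Nat) (cs : List Char), cs.length < fuel →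
    pvClampD cs 0 = 0 → ∀ (na : List Char) (sb : Bool) (gs : List (List Char)),
    cs.foldl pvStepB (na, sb, gs, 0, []) =
      ((if sb then na else na ++ cs.takeWhile (fun x => x ≠ '[')),
        (sb || decide ('[' ∈ cs)), gs ++ pvGroupsOfGo fuel cs, 0, []) := by
  intro fuel
  induction fuel with
  | zero => intro cs hlen; omega
  | succ fuel ih =>
    intro cs hlen hcl na sb gs
    by_cases hm : '[' ∈ cs
    · have hdwne : cs.dropWhile (fun x => x ≠ '[') ≠ [] := by
        intro hnil
        rw [List.dropWhile_eq_nil_iff] at hnil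
        have := hnil '[' hm
        simp at this
      obtain ⟨c0, v, hdw⟩ : ∃ c0 v, cs.dropWhile (fun x => x ≠ '[') = c0 :: v := by
        cases hx : cs.dropWhile (fun x => x ≠ '[') with
        | nil => exact absurd hx hdwne
        | cons c0 v => exact ⟨c0, v, rfl⟩
      have hc0 : c0 = '[' := by
        have := pvDropWhile_head cs (fun x => x ≠ '[') c0 v hdw
        simpa using this
      subst hc0
      have hud : cs.takeWhile (fun x => x ≠ '[') ++ '[' :: v = cs := by
        rw [← hdw]; exact List.takeWhile_append_dropWhile
      set u := cs.takeWhile (fun x => x ≠ '[') with hu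
      have hunobr : '[' ∉ u := by
        intro hmem
        have := List.mem_takeWhile_imp hmem
        simp at this
      have hclv : pvClampD v 1 = 0 := by
        rw [← hud, pvClampD_append, pvClampD_nobr hunobr, pvClampD_cons] at hcl
        simpa using hcl
      cases hsp : pvSplitGrp v 1 with
      | none =>
        have := pvClampD_pos_of_none (by omega) hsp
        omega
      | some p =>
        obtain ⟨g, r⟩ := p
        have hv : v = g ++ r := pvSplitGrp_append hsp
        have hcr : pvClampD r 0 = 0 := by
          rw [pvClampD_of_some (by omega) hsp] at hclv; exact hclv
        have hlens : cs.length = u.length + 1 + (g.length + r.length) := by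
          conv_lhs => rw [← hud, hv]
          simp
          try omega
        have hrlen : r.length < fuel := by omega
        conv_lhs => rw [← hud]
        rw [List.foldl_append, pvFoldB_nobr hunobr na sb gs, List.foldl_cons,
          pvStepB_open, pvFoldB_grp (by omega) hsp, ih r hrlen hcr]
        have hgo : pvGroupsOfGo (fuel + 1) cs = pvCleanPredicate ('[' :: g) :: pvGroupsOfGo fuel r := by
          simp only [pvGroupsOfGo, hdw, hsp]
        have hmcs : decide ('[' ∈ cs) = true := by simpa using hm
        rw [hgo]
        simp [hmcs, pvCleanPredicate]
    · have hcompl : cs.takeWhile (fun x => x ≠ '[') = cs := by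
        apply List.takeWhile_eq_self_iff.mpr
        intro x hx
        simp
        intro hxb
        exact hm (hxb ▸ hx)
      have hgo : pvGroupsOfGo (fuel + 1) cs = [] := by
        have hdwnil : cs.dropWhile (fun x => x ≠ '[') = [] := by
          rw [List.dropWhile_eq_nil_iff]
          intro x hx
          simp
          intro hxb
          exact hm (hxb ▸ hx)
        simp only [pvGroupsOfGo, hdwnil]
      have hmcs : decide ('[' ∈ cs) = false := by simpa using hm
      rw [pvFoldB_nobr hm na sb gs, hcompl, hgo, hmcs]
      simp

theorem pvGetPredsGo_main : ∀ (fuel : Nat) (cs : List Char) (acc : List (List Char)),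
    cs.length < fuel → pvClampD cs 0 = 0 →
    pvGetPredicatesGo fuel cs acc = acc ++ pvGroupsOfGo fuel cs := by
  intro fuel
  induction fuel with
  | zero => intro cs acc hlen; omega
  | succ fuel ih =>
    intro cs acc hlen hcl
    by_cases hm : '[' ∈ cs
    · have hdwne : cs.dropWhile (fun x => x ≠ '[') ≠ [] := by
        intro hnil
        rw [List.dropWhile_eq_nil_iff] at hnil
        have := hnil '[' hm
        simp at this
      obtain ⟨c0, v, hdw⟩ : ∃ c0 v, cs.dropWhile (fun x => x ≠ '[') = c0 :: v := by
        cases hx : cs.dropWhile (fun x => x ≠ '[') with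
        | nil => exact absurd hx hdwne
        | cons c0 v => exact ⟨c0, v, rfl⟩
      have hc0 : c0 = '[' := by
        have := pvDropWhile_head cs (fun x => x ≠ '[') c0 v hdw
        simpa using this
      subst hc0
      have hud : cs.takeWhile (fun x => x ≠ '[') ++ '[' :: v = cs := by
        rw [← hdw]; exact List.takeWhile_append_dropWhile
      set u := cs.takeWhile (fun x => x ≠ '[') with hu
      have hunobr : '[' ∉ u := by
        intro hmem
        have := List.mem_takeWhile_imp hmem
        simp at this
      have hclv : pvClampD v 1 = 0 := by
        rw [← hud, pvClampD_append, pvClampD_nobr hunobr, pvClampD_cons] at hcl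
        simpa using hcl
      have hfind : PySem.Chars.find cs ['['] = ((u.length : Nat) : Int) := by
        rw [pvFind_singleton cs '[', if_pos hm]
      have hfne : ¬ (PySem.Chars.find cs ['['] = -1) := by rw [hfind]; omega
      cases hsp : pvSplitGrp v 1 with
      | none =>
        have := pvClampD_pos_of_none (by omega) hsp
        omega
      | some p =>
        obtain ⟨g, r⟩ := p
        have hv : v = g ++ r := pvSplitGrp_append hsp
        have hcr : pvClampD r 0 = 0 := by
          rw [pvClampD_of_some (by omega) hsp] at hclv; exact hclv
        have hlens : cs.length = u.length + 1 + (g.length + r.length) := by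
          conv_lhs => rw [← hud, hv]
          simp
          try omega
        have hrlen : r.length < fuel := by omega
        have hdrop : cs.drop u.length = '[' :: v := by
          rw [← hud]; exact List.drop_left
        have hfeb : pvFindEndBracket cs ((u.length : Nat) : Int) = ((u.length : Int) + g.length) := by
          rw [pvFindEndBracket]
          have htn : ((u.length : Nat) : Int).toNat = u.length := by simp
          rw [htn, hdrop]
          have h1 : pvFebGo ('[' :: v) ((u.length : Nat) : Int) 0 =
              pvFebGo v (((u.length : Nat) : Int) + 1) ((1 : Nat) : Int) := by
            simp [pvFebGo]
          rw [h1, pvFebGo_some (by omega) hsp]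
          push_cast
          omega
        have hslice1 : PySem.List.slice cs (some ((u.length : Nat) : Int))
            (some (((u.length : Int) + g.length) + 1)) = '[' :: g := by
          have hcast : ((u.length : Int) + g.length) + 1 = ((u.length + g.length + 1 : Nat) : Int) := by
            push_cast; ring
          rw [hcast, PySem.List.slice_natCast]
          have h2 : u.length + g.length + 1 - u.length = g.length + 1 := by omega
          rw [h2, hdrop, hv]
          simp [List.take_left]
        have hslice2 : PySem.List.slice cs (some (((u.length : Int) + g.length) + 1)) none = r := by
          have hcast : ((u.length : Int) + g.length) + 1 = ((u.length + g.length + 1 : Nat) : Int) := by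
            push_cast; ring
          rw [hcast, PySem.List.slice_from_natCast]
          have hcs : cs = (u ++ '[' :: g) ++ r := by
            rw [← hud, hv]; simp
          rw [hcs]
          have h3 : u.length + g.length + 1 = (u ++ '[' :: g).length := by simp; omega
          rw [h3, List.drop_left]
        have hgo : pvGroupsOfGo (fuel + 1) cs = pvCleanPredicate ('[' :: g) :: pvGroupsOfGo fuel r := by
          simp only [pvGroupsOfGo, hdw, hsp]
        simp only [pvGetPredicatesGo, hfind, hfeb, hslice1, hslice2,
          if_neg (show ¬ (((u.length : Nat) : Int) = -1) by omega)]
        rw [ih r (acc ++ [pvCleanPredicate ('[' :: g)]) hrlen hcr, hgo]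
        simp
    · have hfind : PySem.Chars.find cs ['['] = -1 := by
        rw [pvFind_singleton cs '[', if_neg hm]
      have hgo : pvGroupsOfGo (fuel + 1) cs = [] := by
        have hdwnil : cs.dropWhile (fun x => x ≠ '[') = [] := by
          rw [List.dropWhile_eq_nil_iff]
          intro x hx
          simp
          intro hxb
          exact hm (hxb ▸ hx)
        simp only [pvGroupsOfGo, hdwnil]
      simp [pvGetPredicatesGo, hfind, hgo]

theorem pvJoin_head_append (sep a b : List Char) (l : List (List Char)) :
    PySem.Chars.join sep ((a ++ b) :: l) = a ++ PySem.Chars.join sep (b :: l) := by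
  cases l with
  | nil => rw [PySem.Chars.join_singleton, PySem.Chars.join_singleton]
  | cons c l =>
    rw [PySem.Chars.join_cons_cons, PySem.Chars.join_cons_cons]
    simp

theorem pvJoin_tab (name : List Char) : ∀ (gs : List (List Char)) (x : List Char),
    gs.foldl (fun acc p => acc ++ ['\t'] ++ name ++ p) x =
      PySem.Chars.join ['\t'] (x :: gs.map (fun g => name ++ g)) := by
  intro gs
  induction gs with
  | nil => intro x; rw [List.foldl_nil, List.map_nil, PySem.Chars.join_singleton]
  | cons g gs ih =>
    intro x
    rw [List.foldl_cons, ih, List.map_cons, PySem.Chars.join_cons_cons]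
    have h1 : x ++ ['\t'] ++ name ++ g = x ++ (['\t'] ++ (name ++ g)) := by simp
    rw [h1, pvJoin_head_append, pvJoin_head_append]
    simp [List.append_assoc]

theorem pvName_eq (cs : List Char) : pvGetName cs = cs.takeWhile (fun x => x ≠ '[') := by
  unfold pvGetName
  by_cases hm : '[' ∈ cs
  · have hfind : PySem.Chars.find cs ['['] = (((cs.takeWhile (fun x => x ≠ '[')).length : Nat) : Int) := by
      rw [pvFind_singleton cs '[', if_pos hm]
    have hfne : ¬ (PySem.Chars.find cs ['['] = -1) := by rw [hfind]; omega
    rw [if_neg hfne, hfind, PySem.List.slice_to_natCast]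
    calc List.take (cs.takeWhile (fun x => x ≠ '[')).length cs
        = List.take (cs.takeWhile (fun x => x ≠ '[')).length
            (cs.takeWhile (fun x => x ≠ '[') ++ cs.dropWhile (fun x => x ≠ '[')) := by
          rw [List.takeWhile_append_dropWhile]
      _ = cs.takeWhile (fun x => x ≠ '[') := List.take_left
  · have hfind : PySem.Chars.find cs ['['] = -1 := by
      rw [pvFind_singleton cs '[', if_neg hm]
    rw [if_pos hfind]
    symm
    apply List.takeWhile_eq_self_iff.mpr
    intro x hx
    simp
    intro hxb
    exact hm (hxb ▸ hx)

-- ===== VERDICT (by name: the statement is the Claim_ definition above) =====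
theorem sequence_tag_spec : Claim_equal_sequence_tag := by
  unfold Claim_equal_sequence_tag
  intro tag _ hpre
  unfold Spec_sequence_tag sequence_tag sequence_tag_alt
  set cs := tag.toList with hcs
  have hclamp : pvClampD cs 0 = 0 := hpre
  have hfold := pvFoldB_main (cs.length + 1) cs (by omega) hclamp [] false []
  have hpreds : pvGetPredicates cs = pvGroupsOfGo (cs.length + 1) cs := by
    rw [pvGetPredicates, pvGetPredsGo_main (cs.length + 1) cs [] (by omega) hclamp]
    simp
  rw [hfold]
  simp only []
  rw [hpreds, pvName_eq cs]
  set name := cs.takeWhile (fun x => x ≠ '[') with hname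
  set gs := pvGroupsOfGo (cs.length + 1) cs with hgs
  congr 1
  rw [pvJoin_tab name gs (PySem.Int.toChars ((gs.length : Int) + 1) ++ ['\t'] ++ name)]
  rw [PySem.Chars.join_cons_cons]
  have h1 : PySem.Int.toChars ((gs.length : Int) + 1) ++ ['\t'] ++ name =
      PySem.Int.toChars ((gs.length : Int) + 1) ++ (['\t'] ++ name) := by simp
  rw [h1, pvJoin_head_append, pvJoin_head_append]
  simp [List.append_assoc]
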